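-- pv_equiv track=rewrite | github.com/jshales4/AdventOfCode | 2019/src/aoc_2019_08.py | derive_visible_layer
-- ===== SOURCE A (Python) =====
-- from typing import List, Dict
--
-- def derive_visible_layer(layers, wide: int, tall: int):
--     visible_layer: List[str] = ["" for _ in range(wide * tall)]
--     for layer in layers:
--         for key, pixel in enumerate(layer):
--             if visible_layer[key] == "" and pixel in ("1", "0"):
--                 if pixel == "0":
--                     visible_layer[key] = "     "
--                 else:
--                     assert pixel == "1"
--                     visible_layer[key] = "@@@@@"
--     return visible_layer
-- ===== SOURCE B (Python) =====
-- def derive_visible_layer(layers, wide: int, tall: int):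
--     m = {"0": "     ", "1": "@@@@@"}
--     out = []
--     for key in range(wide * tall):
--         px = ""
--         for layer in layers:
--             if key < len(layer) and layer[key] in m:
--                 px = m[layer[key]]
--                 break
--         out.append(px)
--     return out
-- ===== Notes on version B (the rewrite author's own statement) =====
-- stated objective: alternative
-- what changed: B resolves each pixel position independently, scanning the layers for the first one whose pixel at that position is '0' or '1' (position-major first-match with early break), instead of A's layer-major in-place accumulator guarded by an emptiness check.
-- outside the precondition, e.g. on derive_visible_layer([['1', '0', '1']], 1, 2): A raises IndexError, B returns ['@@@@@', '     ']
import Mathlib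
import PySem

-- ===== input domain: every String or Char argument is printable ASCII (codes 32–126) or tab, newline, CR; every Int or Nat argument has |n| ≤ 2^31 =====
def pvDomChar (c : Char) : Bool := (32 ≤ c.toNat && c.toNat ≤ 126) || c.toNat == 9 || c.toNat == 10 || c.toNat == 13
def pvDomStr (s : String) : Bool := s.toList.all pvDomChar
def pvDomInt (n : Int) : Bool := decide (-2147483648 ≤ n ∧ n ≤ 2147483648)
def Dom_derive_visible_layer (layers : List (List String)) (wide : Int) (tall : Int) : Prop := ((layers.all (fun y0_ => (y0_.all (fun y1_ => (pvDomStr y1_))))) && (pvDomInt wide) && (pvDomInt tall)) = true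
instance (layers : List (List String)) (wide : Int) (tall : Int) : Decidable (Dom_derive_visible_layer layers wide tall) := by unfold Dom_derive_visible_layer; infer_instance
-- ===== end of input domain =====

-- B resolves each pixel position independently by a first-match scan over the layers
-- (alternative decomposition, same cost when layers fill the image); A mutates a
-- layer-major accumulator. Equivalence on Pre_ (no layer longer than the image,
-- outside which A raises IndexError).


-- ===== PORT A =====
-- inner loop: `for key, pixel in enumerate(layer)` as index recursion over the layer
def dvlInner (vis : List String) (layer : List String) (key : Nat) : List String :=
  match layer with
  | [] => vis
  | pixel :: rest =>
    let vis' :=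
      match PySem.List.pyGet? vis (key : Int) with
      | some cur =>
        if cur = "" && (pixel == "1" || pixel == "0") then
          (if pixel == "0" then vis.set key "     " else vis.set key "@@@@@")
        else vis
      | none => vis   -- Python raises IndexError here; excluded by Pre_
    dvlInner vis' rest (key + 1)

def derive_visible_layer (layers : List (List String)) (wide : Int) (tall : Int) : List String :=
  let vis0 : List String := List.replicate (wide * tall).toNat ""
  layers.foldl (fun vis layer => dvlInner vis layer 0) vis0

-- ===== PORT B =====
-- per-position resolution: first layer whose pixel at `key` is "0" or "1"
def dvlResolve (layers : List (List String)) (key : Nat) : String :=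
  match layers.find? (fun l => decide (key < l.length) &&
      (l.getD key "" == "0" || l.getD key "" == "1")) with
  | some l => if l.getD key "" == "0" then "     " else "@@@@@"
  | none => ""

def derive_visible_layer_alt (layers : List (List String)) (wide : Int) (tall : Int) : List String :=
  (List.range (wide * tall).toNat).map (dvlResolve layers)

-- ===== PRECONDITION & SPEC =====
-- Pre_ excludes exactly the inputs where A raises IndexError: a layer longer than the image.
def Pre_derive_visible_layer (layers : List (List String)) (wide : Int) (tall : Int) : Prop :=
  ∀ l ∈ layers, (l.length : Int) ≤ max (wide * tall) 0
instance (layers : List (List String)) (wide : Int) (tall : Int) : Decidable (Pre_derive_visible_layer layers wide tall) := by unfold Pre_derive_visible_layer; infer_instance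
def pvWitness_derive_visible_layer : List (List String) × Int × Int := ([["1", "0"], ["0", "1"]], 2, 1)

def Spec_derive_visible_layer (layers : List (List String)) (wide : Int) (tall : Int) (out : List String) : Prop := out = derive_visible_layer_alt layers wide tall
instance (layers : List (List String)) (wide : Int) (tall : Int) (out : List String) : Decidable (Spec_derive_visible_layer layers wide tall out) := by unfold Spec_derive_visible_layer; infer_instance

-- ===== CLAIM (what is proved, stated in full; the proofs are below) =====
def Claim_equal_derive_visible_layer : Prop := ∀ (layers : List (List String)) (wide : Int) (tall : Int), Dom_derive_visible_layer layers wide tall → Pre_derive_visible_layer layers wide tall → Spec_derive_visible_layer layers wide tall (derive_visible_layer layers wide tall)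

-- ===== LEMMAS AND PROOFS =====

lemma dvlInner_length (layer : List String) (vis : List String) (key : Nat) :
    (dvlInner vis layer key).length = vis.length := by
  induction layer generalizing vis key with
  | nil => rfl
  | cons p rest ih =>
    simp only [dvlInner]
    rw [ih]
    cases h : PySem.List.pyGet? vis (key : Int) with
    | none => rfl
    | some cur => split_ifs <;> simp <;> split_ifs <;> simp

lemma dvlInner_getElem? (layer : List String) (vis : List String) (key0 : Nat)
    (h : key0 + layer.length ≤ vis.length) (k : Nat) :
    (dvlInner vis layer key0)[k]? = vis[k]?.map (fun cur =>
      match layer[k - key0]? with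
      | some p => if key0 ≤ k then
          (if cur = "" && (p == "1" || p == "0") then
            (if p == "0" then "     " else "@@@@@") else cur)
        else cur
      | none => cur) := by
  induction layer generalizing vis key0 with
  | nil => cases hv : vis[k]? <;> simp [dvlInner, hv]
  | cons p rest ih =>
    have hk0 : key0 < vis.length := by simp at h; omega
    simp only [dvlInner]
    rw [PySem.List.pyGet?_natCast, List.getElem?_eq_getElem hk0]
    set newv : String := if p == "0" then "     " else "@@@@@" with hnew
    set vis' : List String :=
      (if vis[key0] = "" && (p == "1" || p == "0") then
        (if p == "0" then vis.set key0 "     " else vis.set key0 "@@@@@")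
      else vis) with hvis'
    have hvg : vis'[k]? = if k = key0 then
        some (if vis[key0] = "" && (p == "1" || p == "0") then newv else vis[key0])
      else vis[k]? := by
      by_cases hk : k = key0
      · subst hk
        rw [hvis', hnew]
        split_ifs with h1 h2 <;>
          simp_all
      · rw [hvis']
        have hne : key0 ≠ k := fun he => hk he.symm
        split_ifs with h1 h2 <;> simp [hne]
    have hlen : vis'.length = vis.length := by
      rw [hvis']; split_ifs <;> simp
    have h' : key0 + 1 + rest.length ≤ vis'.length := by
      rw [hlen]; simp at h; omega
    rw [show (dvlInner vis' rest (key0 + 1)) = dvlInner vis' rest (key0 + 1) from rfl,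
        ih vis' (key0 + 1) h', hvg]
    by_cases hkk : k = key0
    · subst hkk
      simp [List.getElem?_eq_getElem hk0]
      split_ifs <;> simp_all <;> (cases rest[0]? <;> rfl)
    · rcases Nat.lt_or_ge k key0 with hlt | hge
      · have h1 : ¬ key0 + 1 ≤ k := by omega
        have h2 : ¬ key0 ≤ k := by omega
        have h3 : k - key0 = 0 := by omega
        have h4 : k - (key0 + 1) = 0 := by omega
        rw [if_neg hkk]
        cases hr : rest[k - (key0 + 1)]? <;> cases hv : vis[k]? <;>
          simp [h1, h2, h3]
      · have hge' : key0 < k := by omega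
        have h1 : key0 + 1 ≤ k := by omega
        have h2 : key0 ≤ k := by omega
        have h3 : (p :: rest)[k - key0]? = rest[k - (key0 + 1)]? := by
          have : k - key0 = (k - (key0 + 1)) + 1 := by omega
          simp [this]
        rw [h3, if_neg hkk]
        cases hr : rest[k - (key0 + 1)]? <;> cases hv : vis[k]? <;>
          simp [h1, h2]

lemma dvlResolve_cons_pos (l : List String) (rest : List (List String)) (k : Nat)
    (hkl : k < l.length) (h01 : l.getD k "" = "0" ∨ l.getD k "" = "1") :
    dvlResolve (l :: rest) k = if l.getD k "" == "0" then "     " else "@@@@@" := by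
  unfold dvlResolve
  have hpred : (decide (k < l.length) && (l.getD k "" == "0" || l.getD k "" == "1")) = true := by
    rcases h01 with h1 | h1 <;> rw [h1] <;> simp [hkl]
  simp only [List.find?_cons, hpred]

lemma dvlResolve_cons_neg (l : List String) (rest : List (List String)) (k : Nat)
    (h : ¬ (k < l.length ∧ (l.getD k "" = "0" ∨ l.getD k "" = "1"))) :
    dvlResolve (l :: rest) k = dvlResolve rest k := by
  unfold dvlResolve
  rw [List.find?_cons_of_neg]
  simp only [Bool.and_eq_true, Bool.or_eq_true, beq_iff_eq, decide_eq_true_eq, not_and]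
  intro h1 h2
  exact h ⟨h1, by tauto⟩

lemma dvlFold_getElem? (layers : List (List String)) (vis : List String)
    (h : ∀ l ∈ layers, l.length ≤ vis.length) (k : Nat) :
    (layers.foldl (fun vis layer => dvlInner vis layer 0) vis)[k]? =
      vis[k]?.map (fun cur => if cur = "" then dvlResolve layers k else cur) := by
  induction layers generalizing vis with
  | nil =>
    simp only [List.foldl_nil]
    cases hv : vis[k]? with
    | none => simp
    | some cur =>
      unfold dvlResolve
      simp only [List.find?_nil, Option.map_some]
      split_ifs with h1 <;> simp [h1]
  | cons l rest ih =>
    simp only [List.foldl_cons]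
    have hl : l.length ≤ vis.length := h l (by simp)
    have hrest : ∀ l' ∈ rest, l'.length ≤ (dvlInner vis l 0).length := by
      intro l' hl'
      rw [dvlInner_length]
      exact h l' (by simp [hl'])
    rw [ih _ hrest, dvlInner_getElem? l vis 0 (by omega) k]
    rw [Option.map_map]
    cases hv : vis[k]? with
    | none => rfl
    | some cur =>
      simp only [Option.map_some, Function.comp]
      congr 1
      simp only [Nat.zero_le, if_true, Nat.sub_zero]
      by_cases hcur : cur = ""
      · subst hcur
        cases hp : l[k]? with
        | none =>
          have hkl : ¬ k < l.length := by
            intro hc; rw [List.getElem?_eq_getElem hc] at hp; cases hp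
          rw [dvlResolve_cons_neg l rest k (by tauto)]
        | some p =>
          have hkl : k < l.length := by
            by_contra hc
            rw [List.getElem?_eq_none (by omega)] at hp; cases hp
          have hgd : l.getD k "" = p := by simp [List.getD, hp]
          by_cases h01 : p = "1" ∨ p = "0"
          · rw [dvlResolve_cons_pos l rest k hkl (by rw [hgd]; tauto)]
            rcases h01 with h1 | h1 <;> subst h1 <;> simp [hp] <;>
              exact fun hfalse => absurd hfalse (by decide)
          · rw [not_or] at h01
            rw [dvlResolve_cons_neg l rest k
                (by rw [hgd]; rintro ⟨_, h1 | h1⟩ <;>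
                    first | exact h01.2 h1 | exact h01.1 h1)]
            simp [h01.1, h01.2]
      · cases hp : l[k]? with
        | none => simp [hcur]
        | some p => simp [hcur]

-- ===== VERDICT (by name: the statement is the Claim_ definition above) =====
theorem derive_visible_layer_spec : Claim_equal_derive_visible_layer := by
  intro layers wide tall _ hpre
  unfold Spec_derive_visible_layer derive_visible_layer derive_visible_layer_alt
  set n := (wide * tall).toNat with hn
  have hlen : ∀ l ∈ layers, l.length ≤ n := by
    intro l hl
    have := hpre l hl
    omega
  apply List.ext_getElem?
  intro k
  rw [dvlFold_getElem? layers _ (by simpa using hlen) k]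
  by_cases hk : k < n
  · simp [hk]
  · simp [hk]
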